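-- pv_equiv track=rewrite | github.com/tz2614/rosalind | count_num_of_opt_alignments.py | count_alignments
-- ===== SOURCE A (Python) =====
-- def count_alignments(s, t):
-- 	"""
-- 	calculate the minimum edit distance first between the two strings s and t,
-- 	then the number of alignments with that score modulo 2^27 -1
-- 	"""
--
-- 	# initialise distance and alignment count matrices with zeros
-- 	distance = [[0 for index_t in range(len(t)+1)] for index_s in range(len(s)+1)]
-- 	counts = [[0 for index_t in range(len(t)+1)] for index_s in range(len(s)+1)]
--
-- 	# each pos in the first row and column of the distance matrix receives a -1 gap penalty
-- 	# similarly, each pos of the counts matrix starts as 1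
--
-- 	for index_s in range(0, len(s)+1):
-- 		distance[index_s][0] = index_s
-- 		counts[index_s][0] = 1
--
-- 	for index_t in range(1, len(t)+1):
-- 		distance[0][index_t] = index_t
-- 		counts[0][index_t] = 1
--
-- 	# Fill in the matrices.
-- 	for index_s in range(1, len(s)+1):
-- 		for index_t in range(1, len(t)+1):
-- 			scores = [distance[index_s-1][index_t-1] + (s[index_s-1] != t[index_t-1]),
-- 			          distance[index_s-1][index_t] + 1,
-- 			          distance[index_s][index_t-1] + 1]
-- 			distance[index_s][index_t] = min(scores)
--
-- 			# if the score matches the minimum, add the preceeding number of alignment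
-- 			if distance[index_s][index_t] == scores[0]:
-- 				counts[index_s][index_t] += counts[index_s-1][index_t-1]
-- 			if distance[index_s][index_t] == scores[1]:
-- 				counts[index_s][index_t] += counts[index_s-1][index_t]
-- 			if distance[index_s][index_t] == scores[2]:
-- 				counts[index_s][index_t] += counts[index_s][index_t-1]
--
-- 			# take the count modulo 2**27 -1
-- 			counts[index_s][index_t] = counts[index_s][index_t] % ((2**27)-1)
--
-- 	return counts[-1][-1]
-- ===== SOURCE B (Python) =====
-- def count_alignments(s, t):
--     """Top-down memoized recursion on prefix lengths (i, j); each subproblem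
--     returns the pair (edit distance, alignment count mod 2^27-1)."""
--     M = (1 << 27) - 1
--     memo = {}
--
--     def go(i, j):
--         r = memo.get((i, j))
--         if r is not None:
--             return r
--         if i == 0:
--             r = (j, 1)
--         elif j == 0:
--             r = (i, 1)
--         else:
--             dd, cd = go(i - 1, j - 1)
--             du, cu = go(i - 1, j)
--             dl, cl = go(i, j - 1)
--             a = dd + (s[i - 1] != t[j - 1])
--             b = du + 1
--             c = dl + 1
--             d = min(min(a, b), c)
--             n = 0
--             if d == a:
--                 n += cd
--             if d == b:
--                 n += cu
--             if d == c:
--                 n += cl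
--             r = (d, n % M)
--         memo[(i, j)] = r
--         return r
--
--     return go(len(s), len(t))[1]
-- ===== Notes on version B (the rewrite author's own statement) =====
-- stated objective: alternative
-- what changed: Replaces A's iterative bottom-up fill of explicit (n+1)x(m+1) matrices with top-down memoized recursion on prefix lengths, each call returning a (distance, count mod 2^27-1) pair cached in a dictionary.
import Mathlib
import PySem

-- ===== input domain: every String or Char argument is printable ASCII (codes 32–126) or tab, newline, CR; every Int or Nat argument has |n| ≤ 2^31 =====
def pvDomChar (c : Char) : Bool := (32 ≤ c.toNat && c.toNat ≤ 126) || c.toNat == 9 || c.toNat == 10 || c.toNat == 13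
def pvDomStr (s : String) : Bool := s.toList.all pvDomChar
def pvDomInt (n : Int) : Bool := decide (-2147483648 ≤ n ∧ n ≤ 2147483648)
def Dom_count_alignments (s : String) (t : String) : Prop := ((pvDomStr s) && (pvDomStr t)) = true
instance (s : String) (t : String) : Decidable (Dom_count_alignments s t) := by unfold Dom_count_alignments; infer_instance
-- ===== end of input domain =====

-- B replaces A's iterative bottom-up fill of two explicit matrices by top-down memoized
-- recursion on prefix lengths (a dictionary cache of (distance, count mod 2^27-1) pairs);
-- return values proved equal.

-- ===== PORT A =====
-- A's inner loop over index_t: carries (distance, counts) of the current row together,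
-- reading the previous row (dPrev, cPrev) and the cell to the left (dLeft, cLeft).
def rowA (sc : Char) : List Char → Int → Int → Int → Int → List Int → List Int → (List Int × List Int)
  | [], _, _, _, _, _, _ => ([], [])
  | tc :: ts, dDiag, cDiag, dLeft, cLeft, dUp :: dps, cUp :: cps =>
    let s0 : Int := dDiag + (if sc ≠ tc then 1 else 0)
    let s1 : Int := dUp + 1
    let s2 : Int := dLeft + 1
    let d : Int := min (min s0 s1) s2
    let c : Int := PySem.Int.mod ((if d = s0 then cDiag else 0) + (if d = s1 then cUp else 0)
                    + (if d = s2 then cLeft else 0)) (2 ^ 27 - 1)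
    let rest := rowA sc ts dUp cUp d c dps cps
    (d :: rest.1, c :: rest.2)
  | _ :: _, _, _, _, _, _, _ => ([], [])

-- A's outer loop over index_s: carries the previous row of both matrices.
def loopA (tl : List Char) : List Char → Int → List Int → List Int → List Int
  | [], _, _, cRow => cRow
  | sc :: ss, i, d0 :: ds, c0 :: cs =>
    let pr := rowA sc tl d0 c0 (i + 1) 1 ds cs
    loopA tl ss (i + 1) ((i + 1) :: pr.1) (1 :: pr.2)
  | _ :: _, _, _, _ => []

def count_alignments (s : String) (t : String) : Int :=
  let tl := t.toList
  -- first row/column initialisation: distance[0][j] = j, counts[0][j] = 1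
  let row0d : List Int := (List.range (tl.length + 1)).map Int.ofNat
  let row0c : List Int := List.replicate (tl.length + 1) 1
  (loopA tl s.toList 0 row0d row0c).getLastD 0

-- ===== PORT B =====
-- B's recursive solver go(i, j) with its memo dictionary threaded through.
-- The string indexings s[i-1] / t[j-1] are ported as getD: i-1 / j-1 are always in
-- range here (go is only reached with i ≤ len(s), j ≤ len(t)), so getD is exact.
def goB (sl tl : List Char) (i j : Nat) (memo : PySem.Dict (Nat × Nat) (Int × Int)) :
    PySem.Dict (Nat × Nat) (Int × Int) × (Int × Int) :=
  match memo.get? (i, j) with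
  | some r => (memo, r)
  | none =>
    if _hi : i = 0 then
      let r : Int × Int := ((j : Int), 1)
      (memo.insert (i, j) r, r)
    else if _hj : j = 0 then
      let r : Int × Int := ((i : Int), 1)
      (memo.insert (i, j) r, r)
    else
      let p1 := goB sl tl (i - 1) (j - 1) memo
      let p2 := goB sl tl (i - 1) j p1.1
      let p3 := goB sl tl i (j - 1) p2.1
      let a : Int := p1.2.1 + (if sl.getD (i - 1) ' ' ≠ tl.getD (j - 1) ' ' then 1 else 0)
      let b : Int := p2.2.1 + 1
      let c : Int := p3.2.1 + 1
      let d : Int := min (min a b) c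
      let n : Int := (if d = a then p1.2.2 else 0) + (if d = b then p2.2.2 else 0)
                      + (if d = c then p3.2.2 else 0)
      let r : Int × Int := (d, PySem.Int.mod n (2 ^ 27 - 1))
      (p3.1.insert (i, j) r, r)
  termination_by (i, j)
  decreasing_by
    · exact Prod.Lex.left _ _ (by omega)
    · exact Prod.Lex.left _ _ (by omega)
    · exact Prod.Lex.right _ (by omega)

def count_alignments_alt (s : String) (t : String) : Int :=
  (goB s.toList t.toList s.toList.length t.toList.length PySem.Dict.empty).2.2

-- ===== PRECONDITION & SPEC =====
def Spec_count_alignments (s : String) (t : String) (out : Int) : Prop := out = count_alignments_alt s t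
instance (s : String) (t : String) (out : Int) : Decidable (Spec_count_alignments s t out) := by unfold Spec_count_alignments; infer_instance

-- ===== CLAIM (what is proved, stated in full; the proofs are below) =====
def Claim_equal_count_alignments : Prop := ∀ (s : String) (t : String), Dom_count_alignments s t → Spec_count_alignments s t (count_alignments s t)

-- ===== LEMMAS AND PROOFS =====

-- One DP cell from its three predecessors: (distance, count mod 2^27-1).
def cell (sc tc : Char) (pd pu pl : Int × Int) : Int × Int :=
  let a : Int := pd.1 + (if sc ≠ tc then 1 else 0)
  let b : Int := pu.1 + 1
  let c : Int := pl.1 + 1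
  let d : Int := min (min a b) c
  (d, PySem.Int.mod ((if d = a then pd.2 else 0) + (if d = b then pu.2 else 0)
      + (if d = c then pl.2 else 0)) (2 ^ 27 - 1))

-- The common mathematical recurrence: F i j = (edit distance, count mod 2^27-1) of the
-- length-i prefix of sl against the length-j prefix of tl.
def F (sl tl : List Char) : Nat → Nat → Int × Int
  | 0, j => ((j : Int), 1)
  | i + 1, 0 => ((i : Int) + 1, 1)
  | i + 1, j + 1 =>
    cell (sl.getD i ' ') (tl.getD j ' ') (F sl tl i j) (F sl tl i (j + 1)) (F sl tl (i + 1) j)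

-- memo invariant: every cached value is the corresponding F value
def InvMemo (sl tl : List Char) (memo : PySem.Dict (Nat × Nat) (Int × Int)) : Prop :=
  ∀ i j r, memo.get? (i, j) = some r → r = F sl tl i j

theorem invMemo_insert (sl tl : List Char) (memo : PySem.Dict (Nat × Nat) (Int × Int))
    (i j : Nat) (r : Int × Int) (h : InvMemo sl tl memo) (hr : r = F sl tl i j) :
    InvMemo sl tl (memo.insert (i, j) r) := by
  intro i' j' r' hget
  rw [PySem.Dict.get?_insert] at hget
  by_cases he : ((i', j') : Nat × Nat) = (i, j)
  · obtain ⟨rfl, rfl⟩ := Prod.mk.inj he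
    simp at hget
    exact hget ▸ hr
  · simp [he] at hget
    exact h i' j' r' hget

theorem goB_F (sl tl : List Char) (i j : Nat) (memo : PySem.Dict (Nat × Nat) (Int × Int))
    (h : InvMemo sl tl memo) :
    (goB sl tl i j memo).2 = F sl tl i j ∧ InvMemo sl tl (goB sl tl i j memo).1 := by
  unfold goB
  cases hget : memo.get? (i, j) with
  | some r => exact ⟨h i j r hget, h⟩
  | none =>
    by_cases hi : i = 0
    · subst hi
      simp only []
      refine ⟨by simp [F], invMemo_insert _ _ _ _ _ _ h (by simp [F])⟩
    · by_cases hj : j = 0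
      · subst hj
        obtain ⟨i', rfl⟩ := Nat.exists_eq_succ_of_ne_zero hi
        simp only [dif_neg hi]
        refine ⟨by simp [F], invMemo_insert _ _ _ _ _ _ h (by simp [F])⟩
      · obtain ⟨i', rfl⟩ := Nat.exists_eq_succ_of_ne_zero hi
        obtain ⟨j', rfl⟩ := Nat.exists_eq_succ_of_ne_zero hj
        simp only [dif_neg hi, dif_neg hj, Nat.succ_sub_one]
        have h1 := goB_F sl tl i' j' memo h
        have h2 := goB_F sl tl i' (j' + 1) (goB sl tl i' j' memo).1 h1.2
        have h3 := goB_F sl tl (i' + 1) j' (goB sl tl i' (j' + 1) (goB sl tl i' j' memo).1).1 h2.2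
        rw [h1.1, h2.1, h3.1]
        refine ⟨?_, invMemo_insert _ _ _ _ _ _ h3.2 ?_⟩ <;>
        · show _ = F sl tl (i' + 1) (j' + 1)
          conv_rhs => rw [F]
          rfl
  termination_by i + j
  decreasing_by all_goals omega

-- drop j of tl as a cons, for j < length
theorem drop_cons_getD (tl : List Char) (j : Nat) (hj : j < tl.length) :
    tl.drop j = tl.getD j ' ' :: tl.drop (j + 1) := by
  rw [List.getD_eq_getElem?_getD, List.getElem?_eq_getElem hj]
  simp

-- the segment of F-cells of row i at columns j+1, …, j+n
def rowF (sl tl : List Char) (i : Nat) : Nat → Nat → List (Int × Int)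
  | _, 0 => []
  | j, n + 1 => F sl tl i (j + 1) :: rowF sl tl i (j + 1) n

-- one step of A's inner loop is one `cell`
theorem rowA_cons (sc tc : Char) (ts : List Char) (pd pu pl : Int × Int)
    (dps cps : List Int) :
    rowA sc (tc :: ts) pd.1 pd.2 pl.1 pl.2 (pu.1 :: dps) (pu.2 :: cps)
      = ((cell sc tc pd pu pl).1
           :: (rowA sc ts pu.1 pu.2 (cell sc tc pd pu pl).1 (cell sc tc pd pu pl).2 dps cps).1,
         (cell sc tc pd pu pl).2
           :: (rowA sc ts pu.1 pu.2 (cell sc tc pd pu pl).1 (cell sc tc pd pu pl).2 dps cps).2) := by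
  rw [rowA]
  rfl

-- A's inner loop computes row i+1 of F from row i
theorem rowA_F (sl tl : List Char) (i : Nat) :
    ∀ (n j : Nat), n = tl.length - j →
    rowA (sl.getD i ' ') (tl.drop j)
        (F sl tl i j).1 (F sl tl i j).2 (F sl tl (i + 1) j).1 (F sl tl (i + 1) j).2
        ((rowF sl tl i j n).map Prod.fst) ((rowF sl tl i j n).map Prod.snd)
      = ((rowF sl tl (i + 1) j n).map Prod.fst, (rowF sl tl (i + 1) j n).map Prod.snd) := by
  intro n
  induction n with
  | zero =>
    intro j hn
    have : tl.length ≤ j := by omega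
    simp [List.drop_eq_nil_of_le this, rowA, rowF]
  | succ k ih =>
    intro j hn
    have hj : j < tl.length := by omega
    rw [drop_cons_getD tl j hj]
    simp only [rowF, List.map_cons]
    rw [rowA_cons (sl.getD i ' ') (tl.getD j ' ') _ (F sl tl i j) (F sl tl i (j + 1)) (F sl tl (i + 1) j)]
    rw [show cell (sl.getD i ' ') (tl.getD j ' ') (F sl tl i j) (F sl tl i (j + 1)) (F sl tl (i + 1) j)
          = F sl tl (i + 1) (j + 1) from (by rw [F])]
    rw [ih (j + 1) (by omega)]

-- A's outer loop reaches row sl.length of F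
theorem loopA_F (sl tl : List Char) :
    ∀ (n i : Nat), n = sl.length - i → i ≤ sl.length →
    loopA tl (sl.drop i) (i : Int)
        ((F sl tl i 0).1 :: (rowF sl tl i 0 tl.length).map Prod.fst)
        ((F sl tl i 0).2 :: (rowF sl tl i 0 tl.length).map Prod.snd)
      = (F sl tl sl.length 0).2 :: (rowF sl tl sl.length 0 tl.length).map Prod.snd := by
  intro n
  induction n with
  | zero =>
    intro i hn hle
    have : i = sl.length := by omega
    subst this
    simp [List.drop_eq_nil_of_le (le_refl _), loopA]
  | succ k ih =>
    intro i hn hle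
    have hi : i < sl.length := by omega
    rw [drop_cons_getD sl i hi, loopA]
    have hd : ((i : Int) + 1) = (F sl tl (i + 1) 0).1 := by simp [F]
    have hc : (1 : Int) = (F sl tl (i + 1) 0).2 := by simp [F]
    have hr := rowA_F sl tl i tl.length 0 (by omega)
    rw [List.drop_zero] at hr
    rw [hd, hc, hr]
    have hcast : (((i + 1 : Nat) : Int)) = (F sl tl (i + 1) 0).1 := by simp [F]
    rw [← hcast]
    simpa [hcast] using ih (i + 1) (by omega) (by omega)

-- initial rows of A are row 0 of F
theorem rowF_zero_fst (sl tl : List Char) :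
    ∀ (n j : Nat), (rowF sl tl 0 j n).map Prod.fst
      = (List.range' (j + 1) n).map Int.ofNat := by
  intro n
  induction n with
  | zero => intro j; simp [rowF]
  | succ k ih =>
    intro j
    simp only [rowF, List.range'_succ, List.map_cons]
    rw [ih (j + 1)]
    simp [F]

theorem rowF_zero_snd (sl tl : List Char) :
    ∀ (n j : Nat), (rowF sl tl 0 j n).map Prod.snd = List.replicate n 1 := by
  intro n
  induction n with
  | zero => intro j; simp [rowF]
  | succ k ih =>
    intro j
    simp only [rowF, List.map_cons, List.replicate]
    rw [ih (j + 1)]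
    simp [F]

theorem init_d (sl tl : List Char) :
    (List.range (tl.length + 1)).map Int.ofNat
      = (F sl tl 0 0).1 :: (rowF sl tl 0 0 tl.length).map Prod.fst := by
  rw [rowF_zero_fst, List.range_eq_range', List.range'_succ, List.map_cons]
  simp [F]

theorem init_c (sl tl : List Char) :
    List.replicate (tl.length + 1) (1 : Int)
      = (F sl tl 0 0).2 :: (rowF sl tl 0 0 tl.length).map Prod.snd := by
  rw [rowF_zero_snd]
  simp [F, List.replicate]

-- last element of a row of F
theorem getLastD_row (sl tl : List Char) (i : Nat) :
    ∀ (n j : Nat),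
    ((F sl tl i j).2 :: (rowF sl tl i j n).map Prod.snd).getLastD 0 = (F sl tl i (j + n)).2 := by
  intro n
  induction n with
  | zero => intro j; simp [rowF]
  | succ k ih =>
    intro j
    simp only [rowF, List.map_cons, List.getLastD_cons]
    have := ih (j + 1)
    simp only [List.getLastD_cons] at this ⊢
    rw [show j + (k + 1) = j + 1 + k by omega]
    exact this

-- ===== VERDICT (by name: the statement is the Claim_ definition above) =====
theorem count_alignments_spec : Claim_equal_count_alignments := by
  intro s t _
  show count_alignments s t = count_alignments_alt s t
  have hB : count_alignments_alt s t = (F s.toList t.toList s.toList.length t.toList.length).2 := by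
    unfold count_alignments_alt
    exact congrArg Prod.snd
      (goB_F s.toList t.toList s.toList.length t.toList.length PySem.Dict.empty
        (by intro i j r h; simp [PySem.Dict.get?_empty] at h)).1
  have hA : count_alignments s t = (F s.toList t.toList s.toList.length t.toList.length).2 := by
    show (loopA t.toList s.toList 0 ((List.range (t.toList.length + 1)).map Int.ofNat)
        (List.replicate (t.toList.length + 1) 1)).getLastD 0
      = (F s.toList t.toList s.toList.length t.toList.length).2
    rw [init_d s.toList t.toList, init_c s.toList t.toList]
    have hl := loopA_F s.toList t.toList s.toList.length 0 (by omega) (by omega)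
    simp only [List.drop_zero, Nat.cast_zero] at hl
    rw [hl, getLastD_row s.toList t.toList s.toList.length t.toList.length 0, Nat.zero_add]
  rw [hA, hB]
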